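-- pv_equiv track=rewrite | github.com/riddheshSajwan/data_structures_algorithm | sorting/sumTheDifference.py | solve
-- ===== SOURCE A (Python) =====
-- def solve(A):
--     '''
--     {A[N-1]2^(N-1) +A[N-2]2^(N-2) +…..+A[0]2^0} - {A[0]2^(N-1) + A[1]2^(N-2) +……+ A[0]2^0}
--     for any i (0->N-1), we are finding the number of occurrences when A[i] will be min and when it will be max in all the subsequences.
--     '''
--     MOD = int(1e9+7)
--     n = len(A)
--     A.sort()
--     X = Y = 0
--     for i in range(n):
--         X += A[i] * pow(2,n-1-i,MOD)
--     for i in range(n-1,-1,-1):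
--         Y += A[i] * pow(2,i,MOD)
--     return (Y-X)%MOD
-- ===== SOURCE B (Python) =====
-- def solve(A):
--     # Incremental DP over the sorted prefix (LeetCode-891 style): maintain M, the
--     # sum of minima over all nonempty subsequences of the prefix seen so far, and
--     # p = 2^k (mod MOD).  Each new element a, being the largest so far, closes p
--     # subsequences as their maximum and contributes p*a - (M + a); M and p are
--     # then updated.  No reflection indexing and no per-element pow() is needed.
--     MOD = 10**9 + 7
--     A.sort()
--     ans = 0
--     M = 0
--     p = 1
--     for a in A:
--         ans = (ans + p * a - M - a) % MOD
--         M = (2 * M + a) % MOD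
--         p = p * 2 % MOD
--     return ans
-- ===== Notes on version B (the rewrite author's own statement) =====
-- stated objective: faster
-- what changed: A's two positional loops (each multiplying by pow(2,n-1-i,MOD) resp. pow(2,i,MOD) and subtracting the totals) are replaced by a one-pass incremental DP over the sorted list that maintains the running sum of minima over all nonempty subsequences of the prefix plus a running power of two, adding each element's contribution as the new maximum.
import Mathlib
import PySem

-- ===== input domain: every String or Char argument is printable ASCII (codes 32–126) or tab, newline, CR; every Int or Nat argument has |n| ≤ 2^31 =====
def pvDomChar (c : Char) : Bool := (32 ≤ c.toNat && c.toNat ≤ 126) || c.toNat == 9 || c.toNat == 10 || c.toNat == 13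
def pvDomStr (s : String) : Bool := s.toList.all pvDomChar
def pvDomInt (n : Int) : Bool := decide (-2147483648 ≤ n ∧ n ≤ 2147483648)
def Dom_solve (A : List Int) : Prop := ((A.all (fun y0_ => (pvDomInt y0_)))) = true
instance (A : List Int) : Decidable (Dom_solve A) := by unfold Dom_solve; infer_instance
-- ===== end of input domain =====

-- B replaces A's two positional-power loops by an incremental DP over the sorted prefix that
-- maintains the sum of subsequence minima; equivalence of RETURN values (both sort in place).

-- ===== PORT A =====
-- pow(2, e, MOD): exact for 0 ≤ e (the only exponents A uses)
def pyPow2 (e m : Int) : Int := PySem.Int.mod ((2 : Int) ^ e.toNat) m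

def solve (A : List Int) : Int :=
  let MOD : Int := 1000000007
  let n : Int := PySem.List.len A
  let S := PySem.List.sorted A id
  let X := (PySem.List.pyRange 0 n 1).foldl
    (fun X i => X + PySem.List.pyGetD S i 0 * pyPow2 (n - 1 - i) MOD) 0
  let Y := (PySem.List.pyRange (n - 1) (-1) (-1)).foldl
    (fun Y i => Y + PySem.List.pyGetD S i 0 * pyPow2 i MOD) 0
  PySem.Int.mod (Y - X) MOD

-- ===== PORT B =====
def solve_alt (A : List Int) : Int :=
  let MOD : Int := 1000000007
  let S := PySem.List.sorted A id
  let st := S.foldl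
    (fun (st : Int × Int × Int) a =>
      (PySem.Int.mod (st.1 + st.2.2 * a - st.2.1 - a) MOD,
       PySem.Int.mod (2 * st.2.1 + a) MOD,
       PySem.Int.mod (st.2.2 * 2) MOD)) (0, 0, 1)
  st.1

-- ===== PRECONDITION & SPEC =====
def Spec_solve (A : List Int) (out : Int) : Prop := out = solve_alt A
instance (A : List Int) (out : Int) : Decidable (Spec_solve A out) := by unfold Spec_solve; infer_instance

-- ===== CLAIM (what is proved, stated in full; the proofs are below) =====
def Claim_equal_solve : Prop := ∀ (A : List Int), Dom_solve A → Spec_solve A (solve A)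

-- ===== LEMMAS AND PROOFS =====

-- exact (unreduced) sums B's invariant tracks: Σ s[i]·2^i and Σ s[i]·2^(n-1-i)
def Ysum (s : List Int) : Int := ∑ k ∈ Finset.range s.length, s.getD k 0 * 2 ^ k
def Xsum (s : List Int) : Int := ∑ k ∈ Finset.range s.length, s.getD k 0 * 2 ^ (s.length - 1 - k)

theorem sum_map_range (f : Nat → Int) (n : Nat) :
    ((List.range n).map f).sum = ∑ k ∈ Finset.range n, f k := by
  induction n with
  | zero => simp
  | succ n ih => simp [List.range_succ, Finset.sum_range_succ, ih]

-- A's X loop as a Finset sum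
theorem loopX (s : List Int) (m : Nat) :
    (PySem.List.pyRange 0 (m : Int) 1).foldl
      (fun X i => X + PySem.List.pyGetD s i 0 * pyPow2 ((m : Int) - 1 - i) 1000000007) 0
      = ∑ k ∈ Finset.range m, s.getD k 0 * pyPow2 ((m : Int) - 1 - (k : Int)) 1000000007 := by
  rw [PySem.List.foldl_add, PySem.List.pyRange_zero_nat, List.map_map, sum_map_range]
  simp

-- A's Y loop as a Finset sum
theorem loopY (s : List Int) (m : Nat) :
    (PySem.List.pyRange ((m : Int) - 1) (-1) (-1)).foldl
      (fun Y i => Y + PySem.List.pyGetD s i 0 * pyPow2 i 1000000007) 0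
      = ∑ k ∈ Finset.range m, s.getD k 0 * pyPow2 (k : Int) 1000000007 := by
  rw [PySem.List.foldl_add, PySem.List.pyRange_neg_one_eq_reverse]
  have h1 : ((m : Int) - 1 + 1) = (m : Int) := by ring
  rw [show ((-1 : Int) + 1) = 0 by ring, h1, List.map_reverse, List.sum_reverse,
    PySem.List.pyRange_zero_nat, List.map_map, sum_map_range]
  simp

theorem Xsum_append (t : List Int) (a : Int) :
    Xsum (t ++ [a]) = 2 * Xsum t + a := by
  unfold Xsum
  simp only [List.length_append, List.length_cons, List.length_nil]
  rw [Finset.sum_range_succ]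
  have h1 : (t ++ [a]).getD t.length 0 = a := by
    simp
  rw [h1]
  have h2 : t.length + 1 - 1 - t.length = 0 := by omega
  rw [h2, Finset.mul_sum]
  congr 1
  · apply Finset.sum_congr rfl
    intro k hk
    have hk' : k < t.length := Finset.mem_range.mp hk
    rw [List.getD_append _ _ _ _ hk']
    have : t.length + 1 - 1 - k = (t.length - 1 - k) + 1 := by omega
    rw [this, pow_succ]
    ring
  · simp

theorem Ysum_append (t : List Int) (a : Int) :
    Ysum (t ++ [a]) = Ysum t + a * 2 ^ t.length := by
  unfold Ysum
  simp only [List.length_append, List.length_cons, List.length_nil]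
  rw [Finset.sum_range_succ]
  have h1 : (t ++ [a]).getD t.length 0 = a := by
    simp
  rw [h1]
  congr 1
  apply Finset.sum_congr rfl
  intro k hk
  rw [List.getD_append _ _ _ _ (Finset.mem_range.mp hk)]

-- B's loop invariant: state = (exact answer, exact min-sum, 2^len) all reduced mod MOD
theorem loopB (s : List Int) :
    s.foldl
      (fun (st : Int × Int × Int) a =>
        (PySem.Int.mod (st.1 + st.2.2 * a - st.2.1 - a) 1000000007,
         PySem.Int.mod (2 * st.2.1 + a) 1000000007,
         PySem.Int.mod (st.2.2 * 2) 1000000007)) (0, 0, 1)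
      = ((Ysum s - Xsum s) % 1000000007, Xsum s % 1000000007,
         ((2 : Int) ^ s.length) % 1000000007) := by
  induction s using List.reverseRecOn with
  | nil => simp [Ysum, Xsum]
  | append_singleton t a ih =>
    rw [List.foldl_append, ih]
    simp only [List.foldl_cons, List.foldl_nil]
    rw [PySem.Int.mod_eq_emod_of_pos (by norm_num : (0:Int) < 1000000007),
        PySem.Int.mod_eq_emod_of_pos (by norm_num : (0:Int) < 1000000007),
        PySem.Int.mod_eq_emod_of_pos (by norm_num : (0:Int) < 1000000007)]
    rw [Xsum_append, Ysum_append]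
    refine Prod.ext ?_ (Prod.ext ?_ ?_)
    · show ((Ysum t - Xsum t) % 1000000007 + (2:Int) ^ t.length % 1000000007 * a
          - Xsum t % 1000000007 - a) % 1000000007
          = (Ysum t + a * 2 ^ t.length - (2 * Xsum t + a)) % 1000000007
      conv_rhs => rw [show Ysum t + a * 2 ^ t.length - (2 * Xsum t + a)
          = (Ysum t - Xsum t) + (2:Int) ^ t.length * a - Xsum t - a by ring]
      simp [Int.sub_emod, Int.add_emod, Int.mul_emod]
    · show (2 * (Xsum t % 1000000007) + a) % 1000000007 = (2 * Xsum t + a) % 1000000007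
      simp [Int.add_emod, Int.mul_emod]
    · show ((2:Int) ^ t.length % 1000000007 * 2) % 1000000007
          = (2:Int) ^ (t ++ [a]).length % 1000000007
      rw [List.length_append, List.length_cons, List.length_nil, pow_succ]
      conv_rhs => rw [Int.mul_emod]
      simp [Int.mul_emod]

theorem main_eq (A : List Int) : solve A = solve_alt A := by
  unfold solve solve_alt
  simp only [PySem.List.len]
  set s := PySem.List.sorted A id with hs
  set m := A.length with hm
  have hlen : s.length = m := by rw [hs, hm]; exact PySem.List.length_sorted _ _ _
  rw [loopX, loopY, loopB]
  simp only
  rw [PySem.Int.mod_eq_emod_of_pos (by norm_num : (0:Int) < 1000000007)]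
  -- both sides are (Y - X) % MOD for congruent Y, X
  have hXsum : Xsum s = ∑ k ∈ Finset.range m, s.getD k 0 * 2 ^ (m - 1 - k) := by
    unfold Xsum; rw [hlen]
  have hYsum : Ysum s = ∑ k ∈ Finset.range m, s.getD k 0 * 2 ^ k := by
    unfold Ysum; rw [hlen]
  rw [hXsum, hYsum, Int.sub_emod, Finset.sum_int_mod, Finset.sum_int_mod
      (f := fun k => s.getD k 0 * pyPow2 ((m:Int) - 1 - (k:Int)) 1000000007)]
  conv_rhs => rw [Int.sub_emod, Finset.sum_int_mod, Finset.sum_int_mod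
      (f := fun k => s.getD k 0 * 2 ^ (m - 1 - k))]
  congr 2
  · congr 1
    apply Finset.sum_congr rfl
    intro k hk
    unfold pyPow2
    rw [PySem.Int.mod_eq_emod_of_pos (by norm_num : (0:Int) < 1000000007),
        Int.toNat_natCast, Int.mul_emod, Int.emod_emod_of_dvd _ dvd_rfl, ← Int.mul_emod]
  · congr 1
    apply Finset.sum_congr rfl
    intro k hk
    have hk' : k < m := Finset.mem_range.mp hk
    unfold pyPow2
    rw [PySem.Int.mod_eq_emod_of_pos (by norm_num : (0:Int) < 1000000007)]
    have he : ((m:Int) - 1 - (k:Int)).toNat = m - 1 - k := by omega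
    rw [he, Int.mul_emod, Int.emod_emod_of_dvd _ dvd_rfl, ← Int.mul_emod]

-- ===== VERDICT (by name: the statement is the Claim_ definition above) =====
theorem solve_spec : Claim_equal_solve := by
  intro A _
  unfold Spec_solve
  exact main_eq A
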